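-- pv_equiv track=rewrite | github.com/TeddyMuli/codility | codesignal/tetris2.py | draw_figures_on_grid
-- ===== SOURCE A (Python) =====
-- def draw_figures_on_grid(n, m, figures):
--     grid = [[0 for _ in range(m)] for _ in range(n)]
--
--     # Define figure shapes (relative positions from top-left corner)
--     figure_shapes = {
--         'A': [(0, 0)],  # Single cell
--         'B': [(0, 0), (0, 1), (0, 2), (0, 3)],  # Horizontal line (1x4)
--         'C': [(0, 0), (0, 1), (1, 0), (1, 1)],  # 2x2 square
--         'D': [(0, 1), (1, 0), (1, 1), (1, 2)],  # T-piece
--         'E': [(0, 0), (1, 0), (2, 0), (2, 1)]   # L-piece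
--     }
--
--     # Define positions for each figure (row, col for top-left corner)
--     figure_positions = {
--         'A': (1, 1),   # Position based on the image
--         'B': (3, 2),   # Horizontal rectangle
--         'C': (5, 1),   # 2x2 square
--         'D': (1, 6),   # T-piece (purple)
--         'E': (4, 6)    # L-piece (purple)
--     }
--
--     # Draw each figure
--     for i, figure_type in enumerate(figures, 1):
--         if figure_type in figure_shapes and figure_type in figure_positions:
--             start_row, start_col = figure_positions[figure_type]
--             shape = figure_shapes[figure_type]
--
--             # Draw the figure
--             for dr, dc in shape:
--                 r, c = start_row + dr, start_col + dc
--                 if 0 <= r < n and 0 <= c < m: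
--                     grid[r][c] = 1  # Use 1-based indexing for figures
--
--     return grid
-- ===== SOURCE B (Python) =====
-- # The five figures only ever appear at fixed positions, so precompute each figure's
-- # ABSOLUTE cells once; iterate over the five known figure types (not over `figures`),
-- # keep cells of the types present, and build the grid by a membership sweep.
-- _CELLS = [
--     ('A', [(1, 1)]),
--     ('B', [(3, 2), (3, 3), (3, 4), (3, 5)]),
--     ('C', [(5, 1), (5, 2), (6, 1), (6, 2)]),
--     ('D', [(1, 7), (2, 6), (2, 7), (2, 8)]),
--     ('E', [(4, 6), (5, 6), (6, 6), (6, 7)]),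
-- ]
--
--
-- def draw_figures_on_grid(n, m, figures):
--     filled = {cell for name, cells in _CELLS if name in figures for cell in cells}
--     return [[1 if (r, c) in filled else 0 for c in range(m)] for r in range(n)]
-- ===== Notes on version B (the rewrite author's own statement) =====
-- stated objective: alternative
-- what changed: A pre-zeroes an n-by-m grid and, figure by figure from the input list, stamps guarded writes computed from relative shape plus position dicts; B inverts the traversal: it precomputes each figure type's absolute cells, loops over the five known types testing membership in the input list, collects the present cells into a set, and builds the grid in one membership sweep (duplicates and out-of-bounds writes disappear because marking is idempotent and out-of-range cells are never queried).
import Mathlib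
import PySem

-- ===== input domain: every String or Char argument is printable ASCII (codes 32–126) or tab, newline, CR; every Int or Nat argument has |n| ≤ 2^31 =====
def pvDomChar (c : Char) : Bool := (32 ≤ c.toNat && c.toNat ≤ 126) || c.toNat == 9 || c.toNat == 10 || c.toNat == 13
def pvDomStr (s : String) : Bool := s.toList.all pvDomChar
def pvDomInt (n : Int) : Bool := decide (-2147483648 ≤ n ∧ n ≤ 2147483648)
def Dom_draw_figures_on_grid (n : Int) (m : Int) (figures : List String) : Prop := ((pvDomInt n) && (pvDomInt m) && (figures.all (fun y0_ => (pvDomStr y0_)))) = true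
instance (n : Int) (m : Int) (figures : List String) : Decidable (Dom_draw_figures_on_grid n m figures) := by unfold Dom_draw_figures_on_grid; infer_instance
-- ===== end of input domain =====

-- B inverts A's traversal: instead of stamping guarded writes figure-by-figure from
-- relative shape + position dicts, it precomputes each figure type's absolute cells,
-- loops over the five known types testing membership in `figures`, and builds the
-- grid by one membership sweep over a set (alternative decomposition; same cost).

-- ===== PORT A =====
def pvShapesA : PySem.Dict String (List (Int × Int)) :=
  PySem.Dict.ofList
    [("A", [((0:Int),(0:Int))]),
     ("B", [(0,0),(0,1),(0,2),(0,3)]),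
     ("C", [(0,0),(0,1),(1,0),(1,1)]),
     ("D", [(0,1),(1,0),(1,1),(1,2)]),
     ("E", [(0,0),(1,0),(2,0),(2,1)])]

def pvPositionsA : PySem.Dict String (Int × Int) :=
  PySem.Dict.ofList
    [("A", ((1:Int),(1:Int))), ("B", (3,2)), ("C", (5,1)), ("D", (1,6)), ("E", (4,6))]

-- grid[r][c] = 1, reached only under A's guard 0 <= r < n and 0 <= c < m, so set at (r.toNat, c.toNat) is exact
def pvStampCell (n m : Int) (g : List (List Int)) (r c : Int) : List (List Int) :=
  if 0 ≤ r ∧ r < n ∧ 0 ≤ c ∧ c < m then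
    g.modify r.toNat (fun row => row.set c.toNat 1)
  else g

-- body of A's 'for i, figure_type in enumerate(figures, 1)' loop (A never uses i);
-- figure_positions[k] / figure_shapes[k] are reached only under the contains guard, so getD is exact
def pvDrawFigure (n m : Int) (g : List (List Int)) (fig : String) : List (List Int) :=
  if pvShapesA.contains fig && pvPositionsA.contains fig then
    (pvShapesA.getD fig []).foldl
      (fun g dp =>
        pvStampCell n m g ((pvPositionsA.getD fig (0, 0)).1 + dp.1)
          ((pvPositionsA.getD fig (0, 0)).2 + dp.2)) g
  else g

def draw_figures_on_grid (n : Int) (m : Int) (figures : List String) : List (List Int) :=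
  let grid := (PySem.List.pyRange 0 n 1).map (fun _ => (PySem.List.pyRange 0 m 1).map (fun _ => (0:Int)))
  (PySem.List.enumerate figures 1).foldl (fun g p => pvDrawFigure n m g p.2) grid

-- ===== PORT B =====
-- Source B's _CELLS: each figure type with its precomputed ABSOLUTE cells
def pvFigCells : List (String × List (Int × Int)) :=
  [("A", [((1:Int),(1:Int))]),
   ("B", [(3,2),(3,3),(3,4),(3,5)]),
   ("C", [(5,1),(5,2),(6,1),(6,2)]),
   ("D", [(1,7),(2,6),(2,7),(2,8)]),
   ("E", [(4,6),(5,6),(6,6),(6,7)])]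

def draw_figures_on_grid_alt (n : Int) (m : Int) (figures : List String) : List (List Int) :=
  -- {cell for name, cells in _CELLS if name in figures for cell in cells}
  let filled : PySem.Set (Int × Int) :=
    pvFigCells.foldl
      (fun s p => if p.1 ∈ figures then p.2.foldl PySem.Set.add s else s)
      PySem.Set.empty
  (PySem.List.pyRange 0 n 1).map (fun r =>
    (PySem.List.pyRange 0 m 1).map (fun c => if PySem.Set.contains filled (r, c) then 1 else 0))

-- ===== PRECONDITION & SPEC =====
def Spec_draw_figures_on_grid (n : Int) (m : Int) (figures : List String) (out : List (List Int)) : Prop := out = draw_figures_on_grid_alt n m figures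
instance (n : Int) (m : Int) (figures : List String) (out : List (List Int)) : Decidable (Spec_draw_figures_on_grid n m figures out) := by unfold Spec_draw_figures_on_grid; infer_instance

-- ===== CLAIM (what is proved, stated in full; the proofs are below) =====
def Claim_equal_draw_figures_on_grid : Prop := ∀ (n : Int) (m : Int) (figures : List String), Dom_draw_figures_on_grid n m figures → Spec_draw_figures_on_grid n m figures (draw_figures_on_grid n m figures)

-- ===== LEMMAS AND PROOFS =====

-- the absolute coordinates one figure marks in A (empty for unrecognised figure names)
def pvCellsOf (fig : String) : List (Int × Int) :=
  if pvShapesA.contains fig && pvPositionsA.contains fig then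
    (pvShapesA.getD fig []).map
      (fun dp => ((pvPositionsA.getD fig (0,0)).1 + dp.1, (pvPositionsA.getD fig (0,0)).2 + dp.2))
  else []

def pvEntry (g : List (List Int)) (i j : Nat) : Int := (g.getD i []).getD j 0

def pvShape (n m : Int) (g : List (List Int)) : Prop :=
  g.length = n.toNat ∧ ∀ i, i < n.toNat → (g.getD i []).length = m.toNat

-- A's per-figure cells coincide with B's table entries, membership-wise
lemma pvCellsOf_char (fig : String) (x : Int × Int) :
    x ∈ pvCellsOf fig ↔ ∃ p ∈ pvFigCells, p.1 = fig ∧ x ∈ p.2 := by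
  by_cases hA : fig = "A"
  · subst hA
    have h : pvCellsOf "A" = [(1,1)] := by decide
    rw [h]; simp [pvFigCells]
  by_cases hB : fig = "B"
  · subst hB
    have h : pvCellsOf "B" = [(3,2),(3,3),(3,4),(3,5)] := by decide
    rw [h]; simp [pvFigCells]
  by_cases hC : fig = "C"
  · subst hC
    have h : pvCellsOf "C" = [(5,1),(5,2),(6,1),(6,2)] := by decide
    rw [h]; simp [pvFigCells]
  by_cases hD : fig = "D"
  · subst hD
    have h : pvCellsOf "D" = [(1,7),(2,6),(2,7),(2,8)] := by decide
    rw [h]; simp [pvFigCells]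
  by_cases hE : fig = "E"
  · subst hE
    have h : pvCellsOf "E" = [(4,6),(5,6),(6,6),(6,7)] := by decide
    rw [h]; simp [pvFigCells]
  · have h : pvCellsOf fig = [] := by
      unfold pvCellsOf
      rw [if_neg]
      intro hcon
      have hc : pvShapesA.contains fig = true := (Bool.and_eq_true _ _ |>.mp hcon).1
      have hkeys : pvShapesA.keys = ["A","B","C","D","E"] := by decide
      have hmem := (PySem.Dict.contains_iff_mem_keys pvShapesA fig).mp hc
      rw [hkeys] at hmem
      simp only [List.mem_cons, List.not_mem_nil, or_false] at hmem
      tauto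
    rw [h]
    simp only [List.not_mem_nil, false_iff]
    rintro ⟨p, hp, hfig, -⟩
    simp only [pvFigCells, List.mem_cons, List.not_mem_nil, or_false] at hp
    rcases hp with h' | h' | h' | h' | h' <;> subst h' <;> simp_all

-- membership in B's set of filled cells
lemma pvFilled_mem (l : List (String × List (Int × Int))) (figures : List String)
    (s : PySem.Set (Int × Int)) (x : Int × Int) :
    x ∈ l.foldl (fun s p => if p.1 ∈ figures then p.2.foldl PySem.Set.add s else s) s
      ↔ x ∈ s ∨ ∃ p ∈ l, p.1 ∈ figures ∧ x ∈ p.2 := by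
  induction l generalizing s with
  | nil => simp
  | cons q qs ih =>
    simp only [List.foldl_cons, ih, List.mem_cons]
    have hupd : q.2.foldl PySem.Set.add s = PySem.Set.update s q.2 := rfl
    by_cases hq : q.1 ∈ figures
    · rw [if_pos hq, hupd]
      simp only [PySem.Set.mem_update]
      constructor
      · rintro (⟨h | h⟩ | ⟨p, hp, hf, hx⟩)
        · exact Or.inl h
        · exact Or.inr ⟨q, Or.inl rfl, hq, h⟩
        · exact Or.inr ⟨p, Or.inr hp, hf, hx⟩
      · rintro (h | ⟨p, hp | hp, hf, hx⟩)
        · exact Or.inl (Or.inl h)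
        · subst hp; exact Or.inl (Or.inr hx)
        · exact Or.inr ⟨p, hp, hf, hx⟩
    · rw [if_neg hq]
      constructor
      · rintro (h | ⟨p, hp, hf, hx⟩)
        · exact Or.inl h
        · exact Or.inr ⟨p, Or.inr hp, hf, hx⟩
      · rintro (h | ⟨p, hp | hp, hf, hx⟩)
        · exact Or.inl h
        · subst hp; exact absurd hf hq
        · exact Or.inr ⟨p, hp, hf, hx⟩

lemma pvStamp_shape (n m : Int) (g : List (List Int)) (r c : Int)
    (hg : pvShape n m g) : pvShape n m (pvStampCell n m g r c) := by
  unfold pvStampCell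
  obtain ⟨hlen, hrow⟩ := hg
  split
  · refine ⟨by simpa using hlen, ?_⟩
    intro i hi
    have hil : i < g.length := by omega
    have hg' : g[i]? = some g[i] := List.getElem?_eq_getElem hil
    simp only [List.getD_eq_getElem?_getD, List.getElem?_modify, hg', Option.map_eq_map,
      Option.map_some, Option.getD_some]
    have := hrow i hi
    rw [List.getD_eq_getElem?_getD, hg', Option.getD_some] at this
    split <;> simp [this]
  · exact ⟨hlen, hrow⟩

lemma pvStamp_entry (n m : Int) (g : List (List Int)) (r c : Int) (i j : Nat)
    (hg : pvShape n m g) (hi : i < n.toNat) (hj : j < m.toNat) :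
    pvEntry (pvStampCell n m g r c) i j
      = if r = (i : Int) ∧ c = (j : Int) then 1 else pvEntry g i j := by
  obtain ⟨hlen, hrow⟩ := hg
  have hil : i < g.length := by omega
  have hg' : g[i]? = some g[i] := List.getElem?_eq_getElem hil
  have hrl : (g[i] : List Int).length = m.toNat := by
    have := hrow i hi
    rwa [List.getD_eq_getElem?_getD, hg', Option.getD_some] at this
  unfold pvStampCell pvEntry
  split
  · rename_i hin
    simp only [List.getD_eq_getElem?_getD, List.getElem?_modify, hg', Option.map_eq_map,
      Option.map_some, Option.getD_some]
    by_cases hri : r.toNat = i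
    · simp only [hri, if_true, List.getElem?_set]
      by_cases hcj : c.toNat = j
      · rw [if_pos hcj, if_pos (by omega), Option.getD_some, if_pos ⟨by omega, by omega⟩]
      · rw [if_neg hcj, if_neg (by omega)]
    · rw [if_neg hri, if_neg (by omega)]
  · rename_i hout
    rw [if_neg (by omega)]

lemma pvStamp_fold (n m : Int) (cs : List (Int × Int)) :
    ∀ g : List (List Int), pvShape n m g →
      pvShape n m (cs.foldl (fun g p => pvStampCell n m g p.1 p.2) g) ∧
      ∀ i j, i < n.toNat → j < m.toNat →
        pvEntry (cs.foldl (fun g p => pvStampCell n m g p.1 p.2) g) i j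
          = if ((i : Int), (j : Int)) ∈ cs then 1 else pvEntry g i j := by
  induction cs with
  | nil => intro g hg; exact ⟨hg, by simp⟩
  | cons p ps ih =>
    intro g hg
    obtain ⟨hsh, hent⟩ := ih (pvStampCell n m g p.1 p.2) (pvStamp_shape n m g p.1 p.2 hg)
    refine ⟨hsh, ?_⟩
    intro i j hi hj
    rw [List.foldl_cons, hent i j hi hj, pvStamp_entry n m g p.1 p.2 i j hg hi hj]
    obtain ⟨pa, pb⟩ := p
    by_cases hmem : ((i : Int), (j : Int)) ∈ ps
    · simp [hmem]
    · by_cases hp : pa = (i : Int) ∧ pb = (j : Int)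
      · simp [hmem, hp.1, hp.2]
      · have hne : ¬ (((i : Int), (j : Int)) = (pa, pb)) := by
          intro h; cases h; exact hp ⟨rfl, rfl⟩
        simp [hmem, hp, hne]

lemma pvDrawFigure_eq_foldl (n m : Int) (g : List (List Int)) (fig : String) :
    pvDrawFigure n m g fig
      = (pvCellsOf fig).foldl (fun g p => pvStampCell n m g p.1 p.2) g := by
  unfold pvDrawFigure pvCellsOf
  split
  · rw [List.foldl_map]
  · rfl

lemma pvZeroGrid_shape (n m : Int) :
    pvShape n m ((PySem.List.pyRange 0 n 1).map
      (fun _ => (PySem.List.pyRange 0 m 1).map (fun _ => (0:Int)))) := by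
  constructor
  · simp [PySem.List.length_pyRange_one]
  · intro i hi
    have hil : i < ((PySem.List.pyRange 0 n 1).map
        (fun _ => (PySem.List.pyRange 0 m 1).map (fun _ => (0:Int)))).length := by
      simp [PySem.List.length_pyRange_one]; omega
    rw [List.getD_eq_getElem _ _ hil, List.getElem_map]
    simp [PySem.List.length_pyRange_one]

lemma pvZeroGrid_entry (n m : Int) (i j : Nat) :
    pvEntry ((PySem.List.pyRange 0 n 1).map
      (fun _ => (PySem.List.pyRange 0 m 1).map (fun _ => (0:Int)))) i j = 0 := by
  unfold pvEntry
  by_cases hil : i < ((PySem.List.pyRange 0 n 1).map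
      (fun _ => (PySem.List.pyRange 0 m 1).map (fun _ => (0:Int)))).length
  · rw [List.getD_eq_getElem _ _ hil, List.getElem_map]
    by_cases hjl : j < ((PySem.List.pyRange 0 m 1).map (fun _ => (0:Int))).length
    · rw [List.getD_eq_getElem _ _ hjl, List.getElem_map]
    · rw [List.getD_eq_default _ _ (by omega)]
  · have h0 : ((PySem.List.pyRange 0 n 1).map
        (fun _ => (PySem.List.pyRange 0 m 1).map (fun _ => (0:Int)))).getD i [] = [] :=
      List.getD_eq_default _ _ (by omega)
    rw [h0]
    simp

-- ===== VERDICT (by name: the statement is the Claim_ definition above) =====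
theorem draw_figures_on_grid_spec : Claim_equal_draw_figures_on_grid := by
  intro n m figures _
  show draw_figures_on_grid n m figures = draw_figures_on_grid_alt n m figures
  unfold draw_figures_on_grid draw_figures_on_grid_alt
  set grid0 : List (List Int) := (PySem.List.pyRange 0 n 1).map
    (fun _ => (PySem.List.pyRange 0 m 1).map (fun _ => (0:Int))) with hgrid0
  -- A's loop over enumerate(figures, 1) is the loop over figures (the index is unused)
  have hA1 : (PySem.List.enumerate figures 1).foldl (fun g p => pvDrawFigure n m g p.2) grid0
      = figures.foldl (pvDrawFigure n m) grid0 := by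
    conv_rhs => rw [← PySem.List.map_snd_enumerate figures 1]
    rw [List.foldl_map]
  -- A's per-figure stamping is the fold of guarded single-cell stamps over all cells
  have hA2 : figures.foldl (pvDrawFigure n m) grid0
      = (figures.flatMap pvCellsOf).foldl (fun g p => pvStampCell n m g p.1 p.2) grid0 := by
    rw [List.foldl_flatMap]
    congr 1
    funext g fig
    exact pvDrawFigure_eq_foldl n m g fig
  rw [hA1, hA2]
  obtain ⟨⟨hlen, hrowlen⟩, hent⟩ :=
    pvStamp_fold n m (figures.flatMap pvCellsOf) grid0 (pvZeroGrid_shape n m)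
  set res := (figures.flatMap pvCellsOf).foldl (fun g p => pvStampCell n m g p.1 p.2) grid0
  apply List.ext_getElem
  · simp [hlen, PySem.List.length_pyRange_one]
  · intro i h1 h2
    have hi : i < n.toNat := by omega
    rw [List.getElem_map, PySem.List.getElem_pyRange_one]
    apply List.ext_getElem
    · have := hrowlen i hi
      rw [List.getD_eq_getElem _ _ h1] at this
      simp [this, PySem.List.length_pyRange_one]
    · intro j h3 h4
      have hj : j < m.toNat := by
        simpa [PySem.List.length_pyRange_one] using h4
      rw [List.getElem_map, PySem.List.getElem_pyRange_one]
      have he : res[i][j] = pvEntry res i j := by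
        unfold pvEntry
        rw [List.getD_eq_getElem _ _ h1, List.getD_eq_getElem _ _ h3]
      rw [he, hent i j hi hj, pvZeroGrid_entry n m i j]
      have hmem : PySem.Set.contains
            (pvFigCells.foldl
              (fun s p => if p.1 ∈ figures then p.2.foldl PySem.Set.add s else s)
              PySem.Set.empty) ((0:Int) + (i:Int), (0:Int) + (j:Int)) = true
          ↔ ((i:Int), (j:Int)) ∈ figures.flatMap pvCellsOf := by
        rw [PySem.Set.contains_iff, pvFilled_mem]
        simp only [PySem.Set.empty, List.not_mem_nil, false_or, List.mem_flatMap,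
          zero_add]
        constructor
        · rintro ⟨p, hp, hf, hx⟩
          exact ⟨p.1, hf, (pvCellsOf_char p.1 _).mpr ⟨p, hp, rfl, hx⟩⟩
        · rintro ⟨fig, hf, hx⟩
          obtain ⟨p, hp, hfig, hx⟩ := (pvCellsOf_char fig _).mp hx
          exact ⟨p, hp, hfig ▸ hf, hx⟩
      by_cases hm : ((i : Int), (j : Int)) ∈ figures.flatMap pvCellsOf
      · rw [if_pos hm, if_pos (hmem.mpr hm)]
      · rw [if_neg hm, if_neg (by rw [hmem]; exact hm)]
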